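-- pv_equiv track=rewrite | github.com/HyosungSink/OSKernel2026-T202610486999572 | tools/run_full_local_suite.py | normalized_build_targets
-- ===== SOURCE A (Python) =====
-- def normalized_build_targets(build_targets: str | None) -> str:
--     ordered = [
--         "basic",
--         "busybox",
--         "lua",
--         "libc-test",
--         "iozone",
--         "iperf",
--         "libcbench",
--         "lmbench_src",
--         "cyclictest",
--         "ltp",
--         "netperf",
--     ]
--     if build_targets is None:
--         return "ALL"
--     requested = {part for part in build_targets.split() if part}
--     return " ".join(target for target in ordered if target in requested)
-- ===== SOURCE B (Python) =====
-- def normalized_build_targets(build_targets: str | None) -> str: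
--     if build_targets is None:
--         return "ALL"
--     ordered = [
--         "basic",
--         "busybox",
--         "lua",
--         "libc-test",
--         "iozone",
--         "iperf",
--         "libcbench",
--         "lmbench_src",
--         "cyclictest",
--         "ltp",
--         "netperf",
--     ]
--     priority = {name: i for i, name in enumerate(ordered)}
--     selected = {tok for tok in build_targets.split() if tok in priority}
--     return " ".join(sorted(selected, key=priority.__getitem__))
-- ===== Notes on version B (the rewrite author's own statement) =====
-- stated objective: alternative
-- what changed: Instead of scanning the fixed canonical list and testing each name against a set of requested tokens, B builds a name-to-position index once, keeps the requested tokens that appear in it, and sorts them by canonical position; the traversal is over the request, not the fixed list.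
import Mathlib
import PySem

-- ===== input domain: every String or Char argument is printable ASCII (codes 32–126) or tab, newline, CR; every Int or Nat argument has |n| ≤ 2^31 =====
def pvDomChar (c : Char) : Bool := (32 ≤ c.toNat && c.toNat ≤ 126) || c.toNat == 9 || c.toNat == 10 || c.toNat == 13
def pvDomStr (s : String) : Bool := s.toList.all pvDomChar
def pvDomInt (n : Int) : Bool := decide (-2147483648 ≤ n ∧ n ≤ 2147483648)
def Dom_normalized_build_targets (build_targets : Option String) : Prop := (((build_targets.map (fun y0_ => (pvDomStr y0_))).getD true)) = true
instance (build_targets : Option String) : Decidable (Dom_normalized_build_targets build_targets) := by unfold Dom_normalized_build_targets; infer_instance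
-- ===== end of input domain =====

-- B reorders the requested tokens by a canonical-position index instead of scanning the fixed list; objective: alternative decomposition, same cost.

-- the fixed canonical list, identical literal in both Pythons
def nbtOrdered : List String :=
  ["basic", "busybox", "lua", "libc-test", "iozone", "iperf",
   "libcbench", "lmbench_src", "cyclictest", "ltp", "netperf"]

-- ===== PORT A =====
def normalized_build_targets (build_targets : Option String) : String :=
  match build_targets with
  | none => "ALL"
  | some s =>
    let requested : PySem.Set String :=
      PySem.Set.ofList ((PySem.Str.split₀ s).filter (fun part => part != ""))
    PySem.Str.join " " (nbtOrdered.filter (fun target => PySem.Set.contains requested target))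

-- ===== PORT B =====
-- priority = {name: i for i, name in enumerate(ordered)}
def nbtPriority : PySem.Dict String Int :=
  (PySem.List.enumerate nbtOrdered).foldl (fun d p => d.insert p.2 p.1) PySem.Dict.empty

def normalized_build_targets_alt (build_targets : Option String) : String :=
  match build_targets with
  | none => "ALL"
  | some s =>
    let selected : PySem.Set String :=
      PySem.Set.ofList ((PySem.Str.split₀ s).filter (fun tok => nbtPriority.contains tok))
    -- key=priority.__getitem__: applied only to keys present in priority, so getD is exact here
    PySem.Str.join " " (PySem.List.sorted selected (fun t => nbtPriority.getD t 0) false)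

-- ===== PRECONDITION & SPEC =====
def Spec_normalized_build_targets (build_targets : Option String) (out : String) : Prop := out = normalized_build_targets_alt build_targets
instance (build_targets : Option String) (out : String) : Decidable (Spec_normalized_build_targets build_targets out) := by unfold Spec_normalized_build_targets; infer_instance

-- ===== CLAIM (what is proved, stated in full; the proofs are below) =====
def Claim_equal_normalized_build_targets : Prop := ∀ (build_targets : Option String), Dom_normalized_build_targets build_targets → Spec_normalized_build_targets build_targets (normalized_build_targets build_targets)

-- ===== LEMMAS AND PROOFS =====

theorem nbtPriority_keys : nbtPriority.keys = nbtOrdered := by decide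

theorem nbtPriority_contains_iff (t : String) :
    nbtPriority.contains t = true ↔ t ∈ nbtOrdered := by
  rw [PySem.Dict.contains_iff_mem_keys, nbtPriority_keys]

theorem nbtOrdered_nodup : nbtOrdered.Nodup := by decide

theorem nbtOrdered_pairwise_key :
    nbtOrdered.Pairwise (fun a b => nbtPriority.getD a 0 < nbtPriority.getD b 0) := by
  decide

theorem nbtOrdered_ne_empty : ∀ t ∈ nbtOrdered, t ≠ "" := by decide

-- the heart: filtering the fixed list = sorting the selected tokens by canonical position
theorem core (ts : List String) :
    PySem.List.sorted
      (PySem.Set.ofList (ts.filter (fun tok => nbtPriority.contains tok)))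
      (fun t => nbtPriority.getD t 0) false
    = nbtOrdered.filter
        (fun target => PySem.Set.contains (PySem.Set.ofList (ts.filter (fun part => part != ""))) target) := by
  apply PySem.List.sorted_eq_of_perm_of_pairwise_lt
  · -- permutation: both are nodup with the same members
    rw [List.perm_ext_iff_of_nodup (List.Nodup.filter _ nbtOrdered_nodup) (PySem.Set.nodup_ofList _)]
    intro t
    simp only [List.mem_filter, PySem.Set.mem_ofList, PySem.Set.contains_eq_listContains,
      List.contains_iff_mem, nbtPriority_contains_iff, bne_iff_ne, ne_eq]
    constructor
    · rintro ⟨hord, hts, -⟩; exact ⟨hts, hord⟩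
    · rintro ⟨hts, hord⟩; exact ⟨hord, hts, nbtOrdered_ne_empty t hord⟩
  · exact List.Pairwise.sublist (List.filter_sublist) nbtOrdered_pairwise_key

-- ===== VERDICT (by name: the statement is the Claim_ definition above) =====
theorem normalized_build_targets_spec : Claim_equal_normalized_build_targets := by
  intro bt _
  unfold Spec_normalized_build_targets normalized_build_targets normalized_build_targets_alt
  cases bt with
  | none => rfl
  | some s => exact congrArg (PySem.Str.join " ") (core (PySem.Str.split₀ s)).symm
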